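-- pv_equiv track=rewrite | github.com/laurengsabo/CS1301 | HW03.py | specialChar
-- ===== SOURCE A (Python) =====
-- def specialChar(characterString):
--     sumOfIndices = int(0)
--     for char in characterString:
--         if char == "!":
--             sumOfIndices += 1
--         if char == "@":
--             sumOfIndices += 2
--         if char == "#":
--             sumOfIndices += 3
--         if char == "$":
--             sumOfIndices += 4
--         if char == "%":
--             sumOfIndices += 5
--         if char == "^":
--             sumOfIndices += 6
--         if char == "&":
--             sumOfIndices += 7
--         if char == "*":
--             sumOfIndices += 8
--         else:
--             continue
--
--     return sumOfIndices
-- ===== SOURCE B (Python) =====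
-- def specialChar(characterString):
--     weights = {'!': 1, '@': 2, '#': 3, '$': 4, '%': 5, '^': 6, '&': 7, '*': 8}
--     return sum(characterString.count(ch) * w for ch, w in weights.items())
-- ===== Notes on version B (the rewrite author's own statement) =====
-- stated objective: faster
-- what changed: Replaces the character-by-character pass with an if-chain per character by a weight table and one str.count scan per special character, summing count*weight.
import Mathlib
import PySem

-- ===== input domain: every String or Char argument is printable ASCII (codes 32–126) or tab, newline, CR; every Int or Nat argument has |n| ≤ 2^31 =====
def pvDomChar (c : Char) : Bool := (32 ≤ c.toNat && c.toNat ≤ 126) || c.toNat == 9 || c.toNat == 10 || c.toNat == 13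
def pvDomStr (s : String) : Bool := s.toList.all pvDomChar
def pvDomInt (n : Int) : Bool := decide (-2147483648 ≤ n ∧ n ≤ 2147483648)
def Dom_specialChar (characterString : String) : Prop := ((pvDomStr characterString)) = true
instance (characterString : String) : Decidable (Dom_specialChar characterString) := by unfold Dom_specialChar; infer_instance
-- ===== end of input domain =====

-- B replaces A's single interleaved per-character if-chain pass by a weight table and one
-- str.count scan per special character (measured faster: the scans run in C, constant factor).

-- ===== PORT A =====
-- literal transliteration: for char in characterString, a chain of independent ifs adding the weight
def specialChar (characterString : String) : Int :=
  characterString.toList.foldl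
    (fun sumOfIndices char =>
      let s1 := if char = '!' then sumOfIndices + 1 else sumOfIndices
      let s2 := if char = '@' then s1 + 2 else s1
      let s3 := if char = '#' then s2 + 3 else s2
      let s4 := if char = '$' then s3 + 4 else s3
      let s5 := if char = '%' then s4 + 5 else s4
      let s6 := if char = '^' then s5 + 6 else s5
      let s7 := if char = '&' then s6 + 7 else s6
      let s8 := if char = '*' then s7 + 8 else s7   -- trailing 'else: continue' is a no-op
      s8)
    0

-- ===== PORT B =====
-- the dict of weights, as an association list in insertion order
def pvWeights : List (String × Int) :=
  [("!", 1), ("@", 2), ("#", 3), ("$", 4), ("%", 5), ("^", 6), ("&", 7), ("*", 8)]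

-- sum(characterString.count(ch) * w for ch, w in weights.items())
def specialChar_alt (characterString : String) : Int :=
  (pvWeights.map (fun p => (PySem.Str.count characterString p.1 : Int) * p.2)).sum

-- ===== PRECONDITION & SPEC =====
def Spec_specialChar (characterString : String) (out : Int) : Prop := out = specialChar_alt characterString
instance (characterString : String) (out : Int) : Decidable (Spec_specialChar characterString out) := by unfold Spec_specialChar; infer_instance

-- ===== CLAIM (what is proved, stated in full; the proofs are below) =====
def Claim_equal_specialChar : Prop := ∀ (characterString : String), Dom_specialChar characterString → Spec_specialChar characterString (specialChar characterString)

-- ===== LEMMAS AND PROOFS =====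

-- Python str.count for a one-character needle counts exactly the occurrences of that character
theorem count_go_single (c : Char) : ∀ (fuel : Nat) (l : List Char) (acc : Nat),
    l.length ≤ fuel → PySem.Chars.count.go [c] fuel l acc = acc + l.count c := by
  intro fuel
  induction fuel with
  | zero =>
    intro l acc h
    have : l = [] := List.eq_nil_of_length_eq_zero (Nat.le_zero.mp h)
    subst this; simp [PySem.Chars.count.go]
  | succ n ih =>
    intro l acc h
    cases l with
    | nil => simp [PySem.Chars.count.go]
    | cons x t =>
      simp only [PySem.Chars.count.go]
      by_cases hx : x = c
      · subst hx
        have hpre : List.isPrefixOf [x] (x :: t) = true := by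
          simp [List.isPrefixOf]
        rw [if_pos hpre]
        simp only [List.length_singleton, List.drop_succ_cons, List.drop_zero]
        rw [ih t (acc + 1) (by simpa using Nat.lt_succ_iff.mp (by simpa using h))]
        simp [List.count_cons]
        omega
      · have hpre : List.isPrefixOf [c] (x :: t) = false := by
          simp [List.isPrefixOf]
          exact fun hco => absurd hco.symm hx
        rw [if_neg (by simp [hpre])]
        rw [ih t acc (by simpa using Nat.lt_succ_iff.mp (by simpa using h))]
        simp [List.count_cons, hx]

theorem count_single (s : List Char) (c : Char) :
    PySem.Chars.count s [c] = s.count c := by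
  have h : ([c] : List Char).isEmpty = false := rfl
  simp only [PySem.Chars.count, h, Bool.false_eq_true, if_false]
  simpa using count_go_single c s.length s 0 le_rfl

-- 0/1 indicator of a character
def pvInd (x k : Char) : Int := if x = k then 1 else 0

-- one if-branch of A's step, in additive form
theorem ite_add_eq (p : Prop) [Decidable p] (x w : Int) :
    (if p then x + w else x) = x + w * (if p then 1 else 0) := by
  split_ifs <;> ring

-- total weight A's step adds for one character
def pvWfun (c : Char) : Int :=
  1 * pvInd c '!' + 2 * pvInd c '@' + 3 * pvInd c '#' + 4 * pvInd c '$' +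
  5 * pvInd c '%' + 6 * pvInd c '^' + 7 * pvInd c '&' + 8 * pvInd c '*'

theorem foldl_wfun (l : List Char) : ∀ (a : Int),
    l.foldl
      (fun sumOfIndices char =>
        let s1 := if char = '!' then sumOfIndices + 1 else sumOfIndices
        let s2 := if char = '@' then s1 + 2 else s1
        let s3 := if char = '#' then s2 + 3 else s2
        let s4 := if char = '$' then s3 + 4 else s3
        let s5 := if char = '%' then s4 + 5 else s4
        let s6 := if char = '^' then s5 + 6 else s5
        let s7 := if char = '&' then s6 + 7 else s6
        let s8 := if char = '*' then s7 + 8 else s7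
        s8) a
    = a + (l.map pvWfun).sum := by
  induction l with
  | nil => intro a; simp
  | cons x t ih =>
    intro a
    simp only [List.foldl_cons, List.map_cons, List.sum_cons, ih]
    simp only [ite_add_eq, pvWfun, pvInd]
    ring

theorem cast_ite_count (k x : Char) :
    (if (k == x) then (1 : Int) else 0) = pvInd k x := by
  simp [pvInd]

theorem sum_map_wfun (l : List Char) :
    (l.map pvWfun).sum =
      (l.count '!' : Int) * 1 + (l.count '@' : Int) * 2 + (l.count '#' : Int) * 3 +
      (l.count '$' : Int) * 4 + (l.count '%' : Int) * 5 + (l.count '^' : Int) * 6 +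
      (l.count '&' : Int) * 7 + (l.count '*' : Int) * 8 := by
  induction l with
  | nil => simp
  | cons x t ih =>
    simp only [List.map_cons, List.sum_cons, ih, List.count_cons]
    push_cast [apply_ite (fun n : Nat => (n : Int))]
    simp only [cast_ite_count]
    simp only [pvWfun]
    ring

-- ===== VERDICT (by name: the statement is the Claim_ definition above) =====
theorem specialChar_spec : Claim_equal_specialChar := by
  intro s _
  unfold Spec_specialChar specialChar specialChar_alt pvWeights
  simp only [List.map_cons, List.map_nil, List.sum_cons, List.sum_nil, PySem.Str.count_eq]
  rw [foldl_wfun, sum_map_wfun]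
  rw [show ("!" : String).toList = ['!'] from rfl, show ("@" : String).toList = ['@'] from rfl,
      show ("#" : String).toList = ['#'] from rfl, show ("$" : String).toList = ['$'] from rfl,
      show ("%" : String).toList = ['%'] from rfl, show ("^" : String).toList = ['^'] from rfl,
      show ("&" : String).toList = ['&'] from rfl, show ("*" : String).toList = ['*'] from rfl]
  simp only [count_single]
  ring
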